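-- pv_equiv track=rewrite | github.com/denim-bluu/meeting_transcripts_cleaner | utils/document_diff_viewer.py | _add_speaker_paragraph_breaks
-- ===== SOURCE A (Python) =====
-- def _add_speaker_paragraph_breaks(text: str, structure: dict) -> str:
--     """Add paragraph breaks at inferred speaker changes.
--
--     Args:
--         text: Original text without paragraph breaks
--         structure: Result from detect_speaker_structure()
--
--     Returns:
--         Text with paragraph breaks added before speaker changes
--     """
--     if not structure["inferred_breaks"]:
--         return text
--
--     lines = text.split("\n")
--     result_lines = []
--
--     for i, line in enumerate(lines):
--         # Add extra newline before speaker changes (except first)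
--         if i in structure["inferred_breaks"] and result_lines:
--             result_lines.append("")  # Add empty line for paragraph break
--         result_lines.append(line)
--
--     return "\n".join(result_lines)
-- ===== SOURCE B (Python) =====
-- def _add_speaker_paragraph_breaks(text: str, structure: dict) -> str:
--     """Add paragraph breaks at inferred speaker changes (insert-based rewrite)."""
--     lines = text.split("\n")
--     result = list(lines)
--     valid = {i for i in structure["inferred_breaks"] if 0 < i < len(lines)}
--     for idx in sorted(valid, reverse=True):
--         result.insert(idx, "")
--     return "\n".join(result)
-- ===== Notes on version B (the rewrite author's own statement) =====
-- stated objective: alternative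
-- what changed: Instead of scanning every line and testing its index for membership in the break list, B deduplicates the in-range break indices into a set and inserts an empty line at each, iterating the breaks in descending order so positions do not shift.
import Mathlib
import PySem

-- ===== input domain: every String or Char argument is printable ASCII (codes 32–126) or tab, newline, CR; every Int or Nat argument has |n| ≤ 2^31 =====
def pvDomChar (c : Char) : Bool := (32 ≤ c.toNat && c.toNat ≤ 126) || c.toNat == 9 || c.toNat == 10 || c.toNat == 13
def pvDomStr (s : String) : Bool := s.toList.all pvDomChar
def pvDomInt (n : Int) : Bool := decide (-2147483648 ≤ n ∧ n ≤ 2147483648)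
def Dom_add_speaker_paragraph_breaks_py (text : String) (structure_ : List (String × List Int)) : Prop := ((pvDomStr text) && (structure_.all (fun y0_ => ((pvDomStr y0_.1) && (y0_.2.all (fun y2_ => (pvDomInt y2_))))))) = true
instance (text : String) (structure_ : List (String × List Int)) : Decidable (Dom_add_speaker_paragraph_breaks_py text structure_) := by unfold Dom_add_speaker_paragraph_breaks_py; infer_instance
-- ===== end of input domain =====

-- ===== PORT A =====
-- Port of A: scan enumerate(lines), inserting "" before a line whose index is a break (and acc nonempty).
def add_speaker_paragraph_breaks_py (text : String) (structure_ : List (String × List Int)) : String :=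
  let breaks := (PySem.Dict.get? (PySem.Dict.mk structure_) "inferred_breaks").getD []
  if breaks.isEmpty then text
  else
    let lines := (PySem.Str.split? text "\n").getD []
    let result_lines := (PySem.List.enumerate lines 0).foldl
      (fun acc p => if breaks.contains p.1 && !acc.isEmpty then (acc ++ [""]) ++ [p.2] else acc ++ [p.2]) []
    PySem.Str.join "\n" result_lines

-- ===== PORT B =====
-- Port of B: dedup the in-range break indices into a set, insert "" at each in descending order.
def add_speaker_paragraph_breaks_py_alt (text : String) (structure_ : List (String × List Int)) : String :=
  let lines := (PySem.Str.split? text "\n").getD []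
  let result0 := lines
  let valid : PySem.Set Int := PySem.Set.ofList
    ((PySem.Dict.get? (PySem.Dict.mk structure_) "inferred_breaks").getD []
      |>.filter (fun i => decide (0 < i) && decide (i < (lines.length : Int))))
  let result := (PySem.List.sorted valid (fun x => x) true).foldl
    (fun acc idx => PySem.List.insert acc idx "") result0
  PySem.Str.join "\n" result

-- ===== PRECONDITION & SPEC =====
-- Pre_ excludes only inputs where Python A raises KeyError: the key "inferred_breaks" must be present.
def Pre_add_speaker_paragraph_breaks_py (_text : String) (structure_ : List (String × List Int)) : Prop :=
  (PySem.Dict.get? (PySem.Dict.mk structure_) "inferred_breaks").isSome = true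

instance (text : String) (structure_ : List (String × List Int)) : Decidable (Pre_add_speaker_paragraph_breaks_py text structure_) := by unfold Pre_add_speaker_paragraph_breaks_py; infer_instance

def pvWitness_add_speaker_paragraph_breaks_py : String × (List (String × List Int)) :=
  ("a: hi\nb: yo\nmore", [("inferred_breaks", [1, 2])])

def Spec_add_speaker_paragraph_breaks_py (text : String) (structure_ : List (String × List Int)) (out : String) : Prop := out = add_speaker_paragraph_breaks_py_alt text structure_
instance (text : String) (structure_ : List (String × List Int)) (out : String) : Decidable (Spec_add_speaker_paragraph_breaks_py text structure_ out) := by unfold Spec_add_speaker_paragraph_breaks_py; infer_instance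

-- ===== CLAIM (what is proved, stated in full; the proofs are below) =====
def Claim_equal_add_speaker_paragraph_breaks_py : Prop := ∀ (text : String) (structure_ : List (String × List Int)), Dom_add_speaker_paragraph_breaks_py text structure_ → Pre_add_speaker_paragraph_breaks_py text structure_ → Spec_add_speaker_paragraph_breaks_py text structure_ (add_speaker_paragraph_breaks_py text structure_)

-- ===== LEMMAS AND PROOFS =====

-- canonical interleaving: lines with "" inserted before every line whose index is in ds
def pvItl (ds : List Int) : Nat → List String → List String
  | _, [] => []
  | i, l :: ls => (if (i : Int) ∈ ds then ["", l] else [l]) ++ pvItl ds (i+1) ls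

theorem pvItl_congr (ds₁ ds₂ : List Int) (h : ∀ x, x ∈ ds₁ ↔ x ∈ ds₂) :
    ∀ (ls : List String) (i : Nat), pvItl ds₁ i ls = pvItl ds₂ i ls := by
  intro ls
  induction ls with
  | nil => intro i; rfl
  | cons l ls ih => intro i; simp [pvItl, h, ih]

theorem pvItl_cons_of_lt (d : Int) (ds : List Int) :
    ∀ (ls : List String) (i : Nat), d < (i : Int) →
      pvItl (d :: ds) i ls = pvItl ds i ls := by
  intro ls
  induction ls with
  | nil => intro i _; rfl
  | cons l ls ih =>
    intro i hd
    have : ((i : Int) = d) = False := by simp; omega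
    simp [pvItl, this, ih (i+1) (by push_cast; omega)]

theorem pvItl_length (ds : List Int) :
    ∀ (ls : List String) (i : Nat), ls.length ≤ (pvItl ds i ls).length := by
  intro ls
  induction ls with
  | nil => intro i; simp [pvItl]
  | cons l ls ih =>
    intro i
    have := ih (i+1)
    by_cases h : (i : Int) ∈ ds <;> simp [pvItl, h] <;> omega

-- inserting "" at d, with every break in ds strictly beyond d, realises the break at d
theorem pvInsert_itl (d : Nat) (ds : List Int) (hds : ∀ e ∈ ds, (d : Int) < e) :
    ∀ (ls : List String) (i : Nat), i ≤ d → d < i + ls.length →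
      List.take (d - i) (pvItl ds i ls) ++ "" :: List.drop (d - i) (pvItl ds i ls)
        = pvItl ((d : Int) :: ds) i ls := by
  intro ls
  induction ls with
  | nil => intro i _ h2; simp at h2; omega
  | cons l ls ih =>
    intro i h1 h2
    have hnotin : ((i : Int) ∈ ds) = False := by
      simp only [eq_iff_iff, iff_false]
      intro h; have := hds _ h; omega
    by_cases heq : i = d
    · subst heq
      have hne : ¬ ((i : Int) ∈ ds) := by simp [hnotin]
      simp [pvItl, hnotin]
      exact (pvItl_cons_of_lt (i : Int) ds ls (i+1) (by push_cast; omega)).symm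
    · have hlt : i < d := by omega
      have hstep : d - i = (d - (i+1)) + 1 := by omega
      have hii : (((i:Nat) : Int) = (d:Int)) = False := by simp; omega
      simp only [pvItl, hnotin, if_false, List.mem_cons, hii, false_or, List.singleton_append]
      rw [hstep]
      simp only [List.take_succ_cons, List.drop_succ_cons, List.cons_append]
      rw [ih (i+1) (by omega) (by simp at h2 ⊢; omega)]

theorem pvItl_nil_id : ∀ (ls : List String) (i : Nat), pvItl [] i ls = ls := by
  intro ls
  induction ls with
  | nil => intro i; rfl
  | cons l ls ih => intro i; simp [pvItl, ih]

-- B's descending-insert fold computes pvItl of the (strictly descending) index list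
theorem pvFold_insert (lines : List String) :
    ∀ (asc : List Int), asc.Pairwise (· < ·) →
      (∀ e ∈ asc, 0 < e ∧ e < (lines.length : Int)) →
      List.foldr (fun d acc => PySem.List.insert acc d "") lines asc = pvItl asc 0 lines := by
  intro asc
  induction asc with
  | nil =>
    intro _ _
    exact (pvItl_nil_id lines 0).symm
  | cons d ds ih =>
    intro hp hb
    have hp' := List.pairwise_cons.mp hp
    have hd0 : 0 < d := (hb d (by simp)).1
    have hdn : d < (lines.length : Int) := (hb d (by simp)).2
    have hdt : ((d.toNat : Nat) : Int) = d := Int.toNat_of_nonneg (by omega)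
    have ihr := ih hp'.2 (fun e he => hb e (by simp [he]))
    simp only [List.foldr_cons, ihr]
    have hlen : d.toNat ≤ (pvItl ds 0 lines).length := by
      have := pvItl_length ds lines 0
      omega
    rw [← hdt, PySem.List.insert_natCast _ _ _ hlen]
    have hkey := pvInsert_itl d.toNat ds
      (fun e he => by rw [hdt]; exact hp'.1 e he) lines 0 (by omega) (by omega)
    simpa [hdt] using hkey

-- A's fold with a nonempty accumulator
theorem pvFoldA (breaks : List Int) :
    ∀ (ls : List String) (i : Nat) (acc : List String), acc ≠ [] →
      (PySem.List.enumerate ls (i : Int)).foldl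
        (fun acc p => if breaks.contains p.1 && !acc.isEmpty then (acc ++ [""]) ++ [p.2] else acc ++ [p.2]) acc
      = acc ++ pvItl breaks i ls := by
  intro ls
  induction ls with
  | nil => intro i acc _; simp [PySem.List.enumerate, pvItl]
  | cons l ls ih =>
    intro i acc hacc
    rw [PySem.List.enumerate_cons]
    have hne : acc.isEmpty = false := by simp [hacc]
    have hcast : ((i : Int) + 1) = ((i + 1 : Nat) : Int) := by push_cast; ring
    by_cases hc : (i : Int) ∈ breaks
    · have hc' : breaks.contains (i : Int) = true := by simpa using hc
      simp only [List.foldl_cons, hc', hne, hcast]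
      rw [if_pos (by simp)]
      rw [ih (i+1) ((acc ++ [""]) ++ [l]) (by simp)]
      simp [pvItl, hc]
    · have hc' : breaks.contains (i : Int) = false := by simpa using hc
      simp only [List.foldl_cons, hc', hne, hcast]
      rw [if_neg (by simp)]
      rw [ih (i+1) (acc ++ [l]) (by simp)]
      simp [pvItl, hc]

theorem pvJoin_append_singleton (c : Char) (xs : List (List Char)) (y : List Char) :
    PySem.Chars.join [c] (xs ++ [y])
      = if xs.isEmpty then y else PySem.Chars.join [c] xs ++ c :: y := by
  induction xs with
  | nil => simp [PySem.Chars.join_singleton]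
  | cons x xs ih =>
    cases xs with
    | nil => simp [PySem.Chars.join_cons_cons, PySem.Chars.join_singleton]
    | cons z zs =>
      have h1 : PySem.Chars.join [c] ((x :: z :: zs) ++ [y])
          = x ++ [c] ++ PySem.Chars.join [c] (z :: (zs ++ [y])) :=
        PySem.Chars.join_cons_cons [c] x z (zs ++ [y])
      rw [h1, show z :: (zs ++ [y]) = (z :: zs) ++ [y] from rfl, ih]
      simp [PySem.Chars.join_cons_cons, List.append_assoc]

-- join of a single-char split is the original char list
theorem pvJoin_go (c : Char) :
    ∀ (fuel : Nat) (l cur : List Char) (acc : List (List Char)),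
      PySem.Chars.join [c] (PySem.Chars.splitOn.go [c] fuel l cur acc)
        = PySem.Chars.join [c] acc.reverse
            ++ (if acc.isEmpty then [] else [c]) ++ cur.reverse ++ l := by
  intro fuel
  induction fuel with
  | zero =>
    intro l cur acc
    rw [PySem.Chars.splitOn.go.eq_def]
    simp only
    rw [List.reverse_cons, pvJoin_append_singleton]
    cases acc <;> simp
  | succ fuel ih =>
    intro l cur acc
    cases l with
    | nil =>
      rw [PySem.Chars.splitOn.go.eq_def]
      simp only
      rw [List.reverse_cons, pvJoin_append_singleton]
      cases acc <;> simp
    | cons ch rest =>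
      rw [PySem.Chars.splitOn.go.eq_def]
      simp only [List.isPrefixOf]
      by_cases hc : c = ch
      · subst hc
        simp only [BEq.rfl, Bool.true_and]
        rw [if_pos trivial, ih]
        rw [List.reverse_cons, pvJoin_append_singleton]
        cases acc <;> simp
      · have : (c == ch) = false := by simp [hc]
        simp only [this, Bool.false_and]
        rw [if_neg (by simp), ih]
        simp

theorem pvJoin_splitOn (c : Char) (s : List Char) :
    PySem.Chars.join [c] (PySem.Chars.splitOn s [c]) = s := by
  rw [PySem.Chars.splitOn, pvJoin_go]
  simp [PySem.Chars.join_nil]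

theorem pvGo_ne_nil (sep : List Char) :
    ∀ (fuel : Nat) (l cur : List Char) (acc : List (List Char)),
      PySem.Chars.splitOn.go sep fuel l cur acc ≠ [] := by
  intro fuel
  induction fuel with
  | zero => intro l cur acc; rw [PySem.Chars.splitOn.go.eq_def]; simp
  | succ fuel ih =>
    intro l cur acc
    cases l with
    | nil => rw [PySem.Chars.splitOn.go.eq_def]; simp
    | cons ch rest =>
      rw [PySem.Chars.splitOn.go.eq_def]
      simp only
      split <;> apply ih

theorem pvSplit_ne_nil (c : Char) (s : List Char) : PySem.Chars.splitOn s [c] ≠ [] := by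
  rw [PySem.Chars.splitOn]; apply pvGo_ne_nil

-- indices ≥ 1 inside the line range: membership in the raw break list and in the filtered set agree
theorem pvItl_memEq (bs : List Int) (n : Nat) :
    ∀ (ls : List String) (i : Nat), 1 ≤ i → i + ls.length ≤ n →
      pvItl bs i ls
        = pvItl (PySem.Set.ofList (bs.filter (fun i => decide (0 < i) && decide (i < (n : Int))))) i ls := by
  intro ls
  induction ls with
  | nil => intro i _ _; rfl
  | cons l ls ih =>
    intro i h1 h2
    have hmem : ((i : Int) ∈ PySem.Set.ofList (bs.filter (fun i => decide (0 < i) && decide (i < (n : Int)))))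
        ↔ (i : Int) ∈ bs := by
      rw [PySem.Set.mem_ofList, List.mem_filter]
      simp only [List.length_cons] at h2
      constructor
      · exact fun h => h.1
      · intro h
        refine ⟨h, ?_⟩
        simp only [Bool.and_eq_true, decide_eq_true_eq]
        constructor <;> [omega; (push_cast; omega)]
    simp only [pvItl, hmem]
    rw [ih (i+1) (by omega) (by simp at h2 ⊢; omega)]

-- the two result-line lists coincide (lines nonempty, indexed from 0)
theorem pvMain (bs : List Int) (lines : List String) (hne : lines ≠ []) :
    (PySem.List.enumerate lines 0).foldl
        (fun acc p => if bs.contains p.1 && !acc.isEmpty then (acc ++ [""]) ++ [p.2] else acc ++ [p.2]) []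
      = (PySem.List.sorted
            (PySem.Set.ofList (bs.filter (fun i => decide (0 < i) && decide (i < (lines.length : Int)))))
            (fun x => x) true).foldl
          (fun acc idx => PySem.List.insert acc idx "") lines := by
  set valid := PySem.Set.ofList (bs.filter (fun i => decide (0 < i) && decide (i < (lines.length : Int)))) with hv
  set asc := PySem.List.sorted valid (fun x => x) false with hasc
  have hpair : asc.Pairwise (· < ·) := PySem.List.sorted_ofList_pairwise_lt _
  have hmemasc : ∀ x, x ∈ asc ↔ x ∈ valid := fun x => PySem.List.mem_sorted _ _ _ x
  have hbound : ∀ e ∈ asc, 0 < e ∧ e < (lines.length : Int) := by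
    intro e he
    have : e ∈ valid := (hmemasc e).mp he
    rw [hv, PySem.Set.mem_ofList, List.mem_filter] at this
    have := this.2
    simp only [Bool.and_eq_true, decide_eq_true_eq] at this
    exact this
  -- B side: the descending fold is pvItl of asc
  have hdesc : PySem.List.sorted valid (fun x => x) true = asc.reverse := by
    apply PySem.List.sorted_rev_eq_of_perm_of_pairwise_gt
    · exact (asc.reverse_perm).trans (PySem.List.sorted_perm _ _ _)
    · exact (List.pairwise_reverse).mpr (by simpa using hpair)
  have hB : (PySem.List.sorted valid (fun x => x) true).foldl
        (fun acc idx => PySem.List.insert acc idx "") lines = pvItl valid 0 lines := by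
    rw [hdesc, List.foldl_reverse, pvFold_insert lines asc hpair hbound]
    exact pvItl_congr asc valid hmemasc lines 0
  -- A side
  obtain ⟨l, rest, rfl⟩ := List.exists_cons_of_ne_nil hne
  rw [show ((0:Int)) = ((0:Nat):Int) from rfl, PySem.List.enumerate_cons, List.foldl_cons]
  rw [if_neg (by simp)]
  rw [show ((0:Nat):Int) + 1 = ((1:Nat):Int) from by omega]
  rw [pvFoldA bs rest 1 ([] ++ [l]) (by simp)]
  rw [hB]
  have h0 : ((0:Int) ∈ valid) = False := by
    simp only [eq_iff_iff, iff_false, hv, PySem.Set.mem_ofList, List.mem_filter]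
    simp
  rw [pvItl_memEq bs (l :: rest).length rest 1 (by omega) (by simp only [List.length_cons]; omega),
    ← hv]
  simp only [pvItl]
  rw [if_neg (by simp [h0])]
  simp

-- split never returns the empty list, and joining the pieces restores the text
theorem pvLines (text : String) :
    ∃ lines : List String, PySem.Str.split? text "\n" = some lines ∧ lines ≠ [] ∧
      PySem.Str.join "\n" lines = text := by
  have hmap := PySem.Str.split?_map text "\n"
  have hsl : ("\n" : String).toList = ['\n'] := by decide
  rw [hsl, PySem.Chars.split?] at hmap
  rw [if_neg (by simp)] at hmap
  cases hsp : PySem.Str.split? text "\n" with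
  | none => rw [hsp] at hmap; simp at hmap
  | some lines =>
    rw [hsp] at hmap
    simp only [Option.map_some, Option.some.injEq] at hmap
    refine ⟨lines, rfl, ?_, ?_⟩
    · intro h
      subst h
      exact pvSplit_ne_nil '\n' text.toList (by simpa using hmap.symm)
    · have : PySem.Str.join "\n" lines
          = String.ofList (PySem.Chars.join ['\n'] (lines.map String.toList)) := rfl
      rw [this, hmap, pvJoin_splitOn]
      exact String.ofList_toList

-- ===== VERDICT (by name: the statement is the Claim_ definition above) =====
theorem add_speaker_paragraph_breaks_py_spec : Claim_equal_add_speaker_paragraph_breaks_py := by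
  intro text structure_ _ hpre
  unfold Pre_add_speaker_paragraph_breaks_py at hpre
  unfold Spec_add_speaker_paragraph_breaks_py
  unfold add_speaker_paragraph_breaks_py add_speaker_paragraph_breaks_py_alt
  obtain ⟨lines, hsp, hlne, hjoin⟩ := pvLines text
  simp only [hsp, Option.getD_some]
  set bs := (PySem.Dict.get? (PySem.Dict.mk structure_) "inferred_breaks").getD [] with hbs
  by_cases hbe : bs.isEmpty
  · rw [if_pos hbe]
    have : bs = [] := by simpa [List.isEmpty_iff] using hbe
    rw [this]
    simp only [List.filter_nil]
    rw [show PySem.Set.ofList ([] : List Int) = [] from rfl]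
    rw [show PySem.List.sorted ([] : List Int) (fun x => x) true = [] from rfl]
    rw [List.foldl_nil]
    exact hjoin.symm
  · rw [if_neg hbe]
    exact congrArg (PySem.Str.join "\n") (pvMain bs lines hlne)
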